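-- pv_equiv track=rewrite | github.com/antonioguj/bronchinet | DistributeProcessDataTrainAndTest.py | find_indexes_names_images_files
-- ===== SOURCE A (Python) =====
-- def find_indexes_names_images_files(names_images_type_data, list_images_files):
--
--     indexes_names = []
--     for iname in names_images_type_data:
--         ifound = False
--         for i, ifile in enumerate(list_images_files):
--             if iname in ifile:
--                 indexes_names.append(i)
--                 ifound = True
--                 break
--         #endfor
--         if not ifound:
--             message = 'data named: \'%s\' not found' % (iname)
--             CatchErrorException(message)
--
--     return indexes_names
-- ===== SOURCE B (Python) =====
-- def find_indexes_names_images_files(names_images_type_data, list_images_files):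
--     # One pass over the files: record for each name the first file index containing it,
--     # then assemble the answer in names order.
--     first_index = {}
--     for i, ifile in enumerate(list_images_files):
--         for iname in names_images_type_data:
--             if iname not in first_index and iname in ifile:
--                 first_index[iname] = i
--     return [first_index[iname] for iname in names_images_type_data]
-- ===== Notes on version B (the rewrite author's own statement) =====
-- stated objective: alternative
-- what changed: Replaces the per-name rescan of all files by a single pass over the files that builds a name->first-index dict, followed by a lookup pass in names order.
import Mathlib
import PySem

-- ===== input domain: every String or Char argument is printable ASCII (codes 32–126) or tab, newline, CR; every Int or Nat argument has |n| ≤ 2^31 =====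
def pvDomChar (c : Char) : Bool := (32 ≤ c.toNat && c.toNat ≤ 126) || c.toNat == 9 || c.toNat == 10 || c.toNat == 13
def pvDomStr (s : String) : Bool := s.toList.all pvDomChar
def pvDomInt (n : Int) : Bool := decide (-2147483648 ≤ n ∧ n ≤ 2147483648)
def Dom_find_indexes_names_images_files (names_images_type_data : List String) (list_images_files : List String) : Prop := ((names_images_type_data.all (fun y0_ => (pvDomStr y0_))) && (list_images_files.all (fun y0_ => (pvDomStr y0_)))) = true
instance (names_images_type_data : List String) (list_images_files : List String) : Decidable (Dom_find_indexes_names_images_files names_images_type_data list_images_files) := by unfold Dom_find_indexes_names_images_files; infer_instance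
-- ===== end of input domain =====

-- B builds a name -> first-file-index table in one pass over the files, then assembles in names order
-- (alternative decomposition; return value only — A raises on unfound names via undefined CatchErrorException, excluded by Pre_).


-- ===== PORT A =====
-- inner 'for i, ifile in enumerate(list_images_files): if iname in ifile: … break' : first index containing iname
def pvScanA (iname : String) (files : List String) (i : Int) : Option Int :=
  match files with
  | [] => none
  | f :: t => if PySem.Str.isIn iname f then some i else pvScanA iname t (i + 1)

def find_indexes_names_images_files (names_images_type_data : List String) (list_images_files : List String) : List Int :=
  names_images_type_data.foldl (fun indexes_names iname =>
    match pvScanA iname list_images_files 0 with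
    | some i => indexes_names ++ [i]
    | none => indexes_names)  -- Python raises here (CatchErrorException is undefined → NameError); excluded by Pre_
    []

-- ===== PORT B =====
-- first pass: for i, ifile in enumerate(files): for iname in names: if iname not in first_index and iname in ifile: first_index[iname] = i
def pvBuildB (names : List String) (files : List String) : PySem.Dict String Int :=
  (PySem.List.enumerate files 0).foldl (fun d p =>
    names.foldl (fun d iname =>
      if !d.contains iname && PySem.Str.isIn iname p.2 then d.insert iname p.1 else d) d)
    PySem.Dict.empty

def find_indexes_names_images_files_alt (names_images_type_data : List String) (list_images_files : List String) : List Int :=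
  let first_index := pvBuildB names_images_type_data list_images_files
  -- [first_index[iname] for iname in names]; Python raises KeyError on a missing key, excluded by Pre_
  names_images_type_data.map (fun iname => first_index.getD iname 0)

-- ===== PRECONDITION & SPEC =====
-- Pre_: every name occurs as a substring of some file — exactly where A returns (otherwise the undefined
-- CatchErrorException raises NameError in A, and B's dict lookup raises KeyError).
def Pre_find_indexes_names_images_files (names_images_type_data : List String) (list_images_files : List String) : Prop :=
  (names_images_type_data.all (fun n => list_images_files.any (fun f => PySem.Str.isIn n f))) = true
instance (names_images_type_data : List String) (list_images_files : List String) : Decidable (Pre_find_indexes_names_images_files names_images_type_data list_images_files) := by unfold Pre_find_indexes_names_images_files; infer_instance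

def pvWitness_find_indexes_names_images_files : List String × List String := (["img", "lbl"], ["x_lbl.nii", "a_img.nii"])

def Spec_find_indexes_names_images_files (names_images_type_data : List String) (list_images_files : List String) (out : List Int) : Prop := out = find_indexes_names_images_files_alt names_images_type_data list_images_files
instance (names_images_type_data : List String) (list_images_files : List String) (out : List Int) : Decidable (Spec_find_indexes_names_images_files names_images_type_data list_images_files out) := by unfold Spec_find_indexes_names_images_files; infer_instance

-- ===== CLAIM (what is proved, stated in full; the proofs are below) =====
def Claim_equal_find_indexes_names_images_files : Prop := ∀ (names_images_type_data : List String) (list_images_files : List String), Dom_find_indexes_names_images_files names_images_type_data list_images_files → Pre_find_indexes_names_images_files names_images_type_data list_images_files → Spec_find_indexes_names_images_files names_images_type_data list_images_files (find_indexes_names_images_files names_images_type_data list_images_files)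

-- ===== LEMMAS AND PROOFS =====

-- the inner per-file loop of B: inserts iname ↦ i exactly for fresh names contained in the file
theorem pvInnerB_get? (names : List String) (f : String) (i : Int)
    (d : PySem.Dict String Int) (x : String) :
    (names.foldl (fun d iname =>
      if !d.contains iname && PySem.Str.isIn iname f then d.insert iname i else d) d).get? x =
      if x ∈ names ∧ d.contains x = false ∧ PySem.Str.isIn x f = true then some i else d.get? x := by
  induction names generalizing d with
  | nil => simp
  | cons n rest ih =>
    simp only [List.foldl_cons, ih]
    by_cases hxn : x = n
    · subst hxn
      by_cases hc : d.contains x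
      · simp [hc]
      · simp only [Bool.not_eq_true] at hc
        by_cases hin : PySem.Chars.isIn x.toList f.toList = true
        · simp [PySem.Str.isIn, hc, hin, PySem.Dict.contains_insert_self,
            PySem.Dict.get?_insert_self]
        · simp [PySem.Str.isIn, hc, hin]
    · have h1 : ∀ (v : Int), (d.insert n v).contains x = d.contains x := by
        intro v; simp [PySem.Dict.contains_insert, hxn]
      have h2 : ∀ (v : Int), (d.insert n v).get? x = d.get? x :=
        fun v => PySem.Dict.get?_insert_of_ne d v hxn
      split_ifs with hcond <;> simp_all [List.mem_cons]

-- the outer loop of B from an arbitrary start: lookup = existing binding, else A's scan from the same start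
theorem pvBuildB_get? (names : List String) (files : List String) (i : Int)
    (d : PySem.Dict String Int) (x : String) :
    ((PySem.List.enumerate files i).foldl (fun d p =>
      names.foldl (fun d iname =>
        if !d.contains iname && PySem.Str.isIn iname p.2 then d.insert iname p.1 else d) d) d).get? x =
      ((d.get? x).orElse (fun _ => if x ∈ names then pvScanA x files i else none)) := by
  induction files generalizing d i with
  | nil =>
    simp only [PySem.List.enumerate_nil, List.foldl_nil, pvScanA]
    cases d.get? x <;> simp
  | cons f t ih =>
    rw [PySem.List.enumerate_cons, List.foldl_cons, ih]
    rw [pvInnerB_get? names f i d x]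
    cases hd : d.get? x with
    | some v =>
      have hc : d.contains x = true := by rw [PySem.Dict.contains_eq_isSome_get?, hd]; rfl
      simp [hc]
    | none =>
      have hc : d.contains x = false := by rw [PySem.Dict.contains_eq_isSome_get?, hd]; rfl
      by_cases hm : x ∈ names
      · by_cases hin : PySem.Chars.isIn x.toList f.toList = true
        · simp [PySem.Str.isIn, hm, hc, hin, pvScanA]
        · simp [PySem.Str.isIn, hm, hc, hin, pvScanA]
      · simp [hm, hc]

theorem pvScanA_isSome (x : String) (files : List String) (i : Int)
    (h : files.any (fun f => PySem.Str.isIn x f) = true) :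
    ∃ v, pvScanA x files i = some v := by
  induction files generalizing i with
  | nil => simp at h
  | cons f t ih =>
    simp only [List.any_cons, Bool.or_eq_true] at h
    by_cases hin : PySem.Chars.isIn x.toList f.toList = true
    · exact ⟨i, by simp [pvScanA, PySem.Str.isIn, hin]⟩
    · rcases h with h | h
      · exact absurd (by simpa [PySem.Str.isIn] using h) hin
      · simpa [pvScanA, PySem.Str.isIn, hin] using ih (i + 1) h

-- A's fold appends one scan result per name once every name is found
theorem pvFoldA_eq_map (names : List String) (files : List String) (acc : List Int)
    (h : ∀ n ∈ names, ∃ v, pvScanA n files 0 = some v) :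
    (names.foldl (fun indexes_names iname =>
      match pvScanA iname files 0 with
      | some i => indexes_names ++ [i]
      | none => indexes_names) acc) =
    acc ++ names.map (fun n => (pvScanA n files 0).getD 0) := by
  induction names generalizing acc with
  | nil => simp
  | cons n rest ih =>
    obtain ⟨v, hv⟩ := h n (by simp)
    simp only [List.foldl_cons, hv, List.map_cons]
    rw [ih (acc ++ [v]) (fun m hm => h m (by simp [hm]))]
    simp

-- ===== VERDICT (by name: the statement is the Claim_ definition above) =====
theorem find_indexes_names_images_files_spec : Claim_equal_find_indexes_names_images_files := by
  intro names files _ hpre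
  unfold Spec_find_indexes_names_images_files
  unfold Pre_find_indexes_names_images_files at hpre
  simp only [List.all_eq_true] at hpre
  have hsome : ∀ n ∈ names, ∃ v, pvScanA n files 0 = some v :=
    fun n hn => pvScanA_isSome n files 0 (hpre n hn)
  unfold find_indexes_names_images_files find_indexes_names_images_files_alt pvBuildB
  rw [pvFoldA_eq_map names files [] hsome]
  simp only [List.nil_append]
  apply List.map_congr_left
  intro n hn
  rw [PySem.Dict.getD_eq_get?_getD, pvBuildB_get? names files 0 PySem.Dict.empty n]
  obtain ⟨v, hv⟩ := hsome n hn
  simp [hn, hv]
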